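-- pv_equiv track=rewrite | github.com/The-Metascience-Observatory/pdf4llm | data_ingestor.py | _authors_overlap
-- ===== SOURCE A (Python) =====
-- def _authors_overlap(existing_authors, fetched_authors):
--     """Check if at least one author surname appears in both author strings.
--     Handles formats like 'Given Family' and 'Family, Given'."""
--     if not existing_authors or not fetched_authors:
--         return False
--     existing_str = str(existing_authors).lower()
--     fetched_str = str(fetched_authors).lower()
--     # Extract surnames: split by semicolon, take last word of each name
--     def get_surnames(s):
--         surnames = set()
--         for name in s.split(';'):
--             name = name.strip()
--             if not name:
--                 continue
--             # Handle "Family, Given" format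
--             if ',' in name:
--                 surnames.add(name.split(',')[0].strip())
--             else:
--                 # "Given Family" format - take last word
--                 parts = name.split()
--                 if parts:
--                     surnames.add(parts[-1].strip().rstrip('.'))
--         return surnames
--     existing_surnames = get_surnames(existing_str)
--     fetched_surnames = get_surnames(fetched_str)
--     return bool(existing_surnames & fetched_surnames)
-- ===== SOURCE B (Python) =====
-- def _authors_overlap(existing_authors, fetched_authors):
--     """Check if at least one author surname appears in both author strings.
--     Sort both surname lists and find a common element with a two-pointer
--     merge scan (no set / hash intersection)."""
--     if not existing_authors or not fetched_authors:
--         return False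
--
--     def surnames(authors):
--         out = []
--         for name in str(authors).lower().split(';'):
--             name = name.strip()
--             if not name:
--                 continue
--             if ',' in name:
--                 out.append(name.split(',')[0].strip())
--             else:
--                 parts = name.split()
--                 if parts:
--                     out.append(parts[-1].strip().rstrip('.'))
--         return out
--
--     xs = sorted(surnames(existing_authors))
--     ys = sorted(surnames(fetched_authors))
--     i = j = 0
--     while i < len(xs) and j < len(ys):
--         if xs[i] == ys[j]:
--             return True
--         if xs[i] < ys[j]:
--             i += 1
--         else:
--             j += 1
--     return False
-- ===== Notes on version B (the rewrite author's own statement) =====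
-- stated objective: alternative
-- what changed: B replaces A's two hash-set build plus set intersection with: collect surnames into plain lists, sort both lists, and detect a common element with a two-pointer merge scan.
import Mathlib
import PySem

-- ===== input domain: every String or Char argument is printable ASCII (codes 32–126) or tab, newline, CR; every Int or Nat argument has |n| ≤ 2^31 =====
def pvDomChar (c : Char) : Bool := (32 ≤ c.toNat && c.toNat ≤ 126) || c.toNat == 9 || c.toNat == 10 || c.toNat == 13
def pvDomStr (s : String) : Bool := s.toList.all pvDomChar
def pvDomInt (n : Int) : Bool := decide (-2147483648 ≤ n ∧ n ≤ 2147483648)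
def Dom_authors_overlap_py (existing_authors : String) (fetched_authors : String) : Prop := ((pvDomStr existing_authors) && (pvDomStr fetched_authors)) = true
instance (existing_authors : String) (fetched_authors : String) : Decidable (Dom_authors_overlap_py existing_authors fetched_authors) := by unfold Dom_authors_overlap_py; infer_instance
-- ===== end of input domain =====

-- B replaces A's "build two surname sets and intersect" with "collect surnames into
-- plain lists, sort both, two-pointer merge scan for a common element" (alternative algorithm).

-- s.split(sep) for a nonempty separator, via PySem.Chars.splitOn (exact)
def pvSplitOn (s : String) (sep : List Char) : List String :=
  (PySem.Chars.splitOn s.toList sep).map String.ofList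

-- s.rstrip('.') — ported by hand (PySem has no single-side strip-with-chars); exact:
-- drops exactly the maximal trailing run of '.' characters.
def pvRstripDot (s : String) : String :=
  String.ofList ((s.toList.reverse.dropWhile (· == '.')).reverse)

-- ===== PORT A =====
-- get_surnames: loop over s.split(';') accumulating a set
def pvGetSurnamesA (s : String) : PySem.Set String :=
  (pvSplitOn s [';']).foldl (fun surnames name0 =>
    let name := PySem.Str.strip name0
    if name == "" then surnames
    else if PySem.Str.isIn "," name then
      PySem.Set.add surnames (PySem.Str.strip ((pvSplitOn name [',']).headD ""))
    else
      let parts := PySem.Str.split₀ name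
      if parts == [] then surnames
      else PySem.Set.add surnames (pvRstripDot (PySem.Str.strip (parts.getLastD ""))))
    PySem.Set.empty

def authors_overlap_py (existing_authors : String) (fetched_authors : String) : Bool :=
  if existing_authors == "" || fetched_authors == "" then false
  else
    let existing_str := PySem.Str.lower existing_authors
    let fetched_str := PySem.Str.lower fetched_authors
    let existing_surnames := pvGetSurnamesA existing_str
    let fetched_surnames := pvGetSurnamesA fetched_str
    !(PySem.Set.inter existing_surnames fetched_surnames).isEmpty

-- ===== PORT B =====
-- surnames(authors): append-loop building a plain list of surnames
def pvSurnamesB (authors : String) : List String :=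
  (pvSplitOn (PySem.Str.lower authors) [';']).foldl (fun out name0 =>
    let name := PySem.Str.strip name0
    if name == "" then out
    else if PySem.Str.isIn "," name then
      out ++ [PySem.Str.strip ((pvSplitOn name [',']).headD "")]
    else
      let parts := PySem.Str.split₀ name
      if parts == [] then out
      else out ++ [pvRstripDot (PySem.Str.strip (parts.getLastD ""))]) []

-- the two-pointer merge scan over the two sorted lists
def pvMergeCommon : List String → List String → Bool
  | [], _ => false
  | _ :: _, [] => false
  | a :: as, b :: bs =>
    if a == b then true
    else if a < b then pvMergeCommon as (b :: bs)
    else pvMergeCommon (a :: as) bs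
termination_by xs ys => xs.length + ys.length

def authors_overlap_py_alt (existing_authors : String) (fetched_authors : String) : Bool :=
  if existing_authors == "" || fetched_authors == "" then false
  else
    let xs := PySem.List.sorted (pvSurnamesB existing_authors) (fun x => x)
    let ys := PySem.List.sorted (pvSurnamesB fetched_authors) (fun x => x)
    pvMergeCommon xs ys

-- ===== PRECONDITION & SPEC =====
def Spec_authors_overlap_py (existing_authors : String) (fetched_authors : String) (out : Bool) : Prop := out = authors_overlap_py_alt existing_authors fetched_authors
instance (existing_authors : String) (fetched_authors : String) (out : Bool) : Decidable (Spec_authors_overlap_py existing_authors fetched_authors out) := by unfold Spec_authors_overlap_py; infer_instance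

-- ===== CLAIM (what is proved, stated in full; the proofs are below) =====
def Claim_equal_authors_overlap_py : Prop := ∀ (existing_authors : String) (fetched_authors : String), Dom_authors_overlap_py existing_authors fetched_authors → Spec_authors_overlap_py existing_authors fetched_authors (authors_overlap_py existing_authors fetched_authors)

-- ===== LEMMAS AND PROOFS =====

-- the common surname-extraction step both loop bodies perform on one name
def pvSurnameStep (name0 : String) : Option String :=
  let name := PySem.Str.strip name0
  if name == "" then none
  else if PySem.Str.isIn "," name then
    some (PySem.Str.strip ((pvSplitOn name [',']).headD ""))
  else
    let parts := PySem.Str.split₀ name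
    if parts == [] then none
    else some (pvRstripDot (PySem.Str.strip (parts.getLastD "")))

-- A's loop body is a conditional Set.add of pvSurnameStep's result
theorem pvFoldA_eq (l : List String) (init : PySem.Set String) :
    l.foldl (fun surnames name0 =>
      let name := PySem.Str.strip name0
      if name == "" then surnames
      else if PySem.Str.isIn "," name then
        PySem.Set.add surnames (PySem.Str.strip ((pvSplitOn name [',']).headD ""))
      else
        let parts := PySem.Str.split₀ name
        if parts == [] then surnames
        else PySem.Set.add surnames (pvRstripDot (PySem.Str.strip (parts.getLastD "")))) init
    = (l.filterMap pvSurnameStep).foldl PySem.Set.add init := by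
  induction l generalizing init with
  | nil => rfl
  | cons h t ih =>
    simp only [List.foldl_cons, List.filterMap_cons]
    have hb : (let name := PySem.Str.strip h;
        if name == "" then init
        else if PySem.Str.isIn "," name then
          PySem.Set.add init (PySem.Str.strip ((pvSplitOn name [',']).headD ""))
        else
          let parts := PySem.Str.split₀ name
          if parts == [] then init
          else PySem.Set.add init (pvRstripDot (PySem.Str.strip (parts.getLastD ""))))
      = match pvSurnameStep h with
        | some s => PySem.Set.add init s
        | none => init := by
      simp only [pvSurnameStep]; split_ifs <;> rfl
    rw [hb]
    cases hs : pvSurnameStep h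
    · exact ih _
    · rw [List.foldl_cons]; exact ih _

-- A's fold builds exactly the set of extracted surnames
theorem pvGetSurnamesA_eq (s : String) :
    pvGetSurnamesA s = PySem.Set.ofList ((pvSplitOn s [';']).filterMap pvSurnameStep) := by
  rw [pvGetSurnamesA, PySem.Set.ofList_eq_foldl, pvFoldA_eq]; rfl

-- B's loop body is a conditional append of pvSurnameStep's result
theorem pvFoldB_eq (l : List String) (acc : List String) :
    l.foldl (fun out name0 =>
      let name := PySem.Str.strip name0
      if name == "" then out
      else if PySem.Str.isIn "," name then
        out ++ [PySem.Str.strip ((pvSplitOn name [',']).headD "")]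
      else
        let parts := PySem.Str.split₀ name
        if parts == [] then out
        else out ++ [pvRstripDot (PySem.Str.strip (parts.getLastD ""))]) acc
    = acc ++ l.filterMap pvSurnameStep := by
  induction l generalizing acc with
  | nil => simp
  | cons h t ih =>
    simp only [List.foldl_cons, List.filterMap_cons]
    have hb : (let name := PySem.Str.strip h;
        if name == "" then acc
        else if PySem.Str.isIn "," name then
          acc ++ [PySem.Str.strip ((pvSplitOn name [',']).headD "")]
        else
          let parts := PySem.Str.split₀ name
          if parts == [] then acc
          else acc ++ [pvRstripDot (PySem.Str.strip (parts.getLastD ""))])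
      = match pvSurnameStep h with
        | some s => acc ++ [s]
        | none => acc := by
      simp only [pvSurnameStep]; split_ifs <;> rfl
    rw [hb]
    cases hs : pvSurnameStep h
    · exact ih _
    · rw [ih]; simp

-- B's fold builds exactly the list of extracted surnames
theorem pvSurnamesB_eq (s : String) :
    pvSurnamesB s = (pvSplitOn (PySem.Str.lower s) [';']).filterMap pvSurnameStep := by
  rw [pvSurnamesB, pvFoldB_eq]; rfl

-- merge scan on two sorted lists decides common-element existence
theorem pvMergeCommon_iff (xs ys : List String)
    (hx : xs.Pairwise (· ≤ ·)) (hy : ys.Pairwise (· ≤ ·)) :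
    pvMergeCommon xs ys = true ↔ ∃ x, x ∈ xs ∧ x ∈ ys := by
  fun_induction pvMergeCommon xs ys with
  | case1 ys => simp
  | case2 a as => simp
  | case3 a as b bs heq =>
    constructor
    · intro _; exact ⟨a, List.mem_cons_self, by rw [eq_of_beq heq]; exact List.mem_cons_self⟩
    · intro _; rfl
  | case4 a as b bs heq hlt ih =>
    have ha : a ∉ b :: bs := by
      intro hmem
      rcases List.mem_cons.mp hmem with h | h
      · exact absurd h (fun h => by simp [h] at heq)
      · have hb : b ≤ a := (List.pairwise_cons.mp hy).1 a h
        exact absurd hlt (not_lt.mpr hb)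
    rw [ih (List.Pairwise.of_cons hx) hy]
    constructor
    · rintro ⟨x, hx1, hx2⟩; exact ⟨x, List.mem_cons_of_mem a hx1, hx2⟩
    · rintro ⟨x, hx1, hx2⟩
      rcases List.mem_cons.mp hx1 with h | h
      · exact absurd (h ▸ hx2) ha
      · exact ⟨x, h, hx2⟩
  | case5 a as b bs heq hlt ih =>
    have hb : b ∉ a :: as := by
      intro hmem
      rcases List.mem_cons.mp hmem with h | h
      · exact absurd h.symm (fun h => by simp [h] at heq)
      · have hab : a ≤ b := (List.pairwise_cons.mp hx).1 b h
        have : a ≠ b := fun h => by simp [h] at heq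
        exact absurd (lt_of_le_of_ne hab this) hlt
    rw [ih hx (List.Pairwise.of_cons hy)]
    constructor
    · rintro ⟨x, hx1, hx2⟩; exact ⟨x, hx1, List.mem_cons_of_mem b hx2⟩
    · rintro ⟨x, hx1, hx2⟩
      rcases List.mem_cons.mp hx2 with h | h
      · exact absurd (h ▸ hx1) hb
      · exact ⟨x, hx1, h⟩

-- ===== VERDICT (by name: the statement is the Claim_ definition above) =====
theorem authors_overlap_py_spec : Claim_equal_authors_overlap_py := by
  intro e f _
  show authors_overlap_py e f = authors_overlap_py_alt e f
  unfold authors_overlap_py authors_overlap_py_alt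
  by_cases hg : (e == "" || f == "") = true
  · simp [hg]
  · simp only [hg, Bool.false_eq_true, if_false]
    rw [pvGetSurnamesA_eq, pvGetSurnamesA_eq, Bool.eq_iff_iff, Bool.not_eq_true',
      List.isEmpty_eq_false_iff,
      pvMergeCommon_iff _ _ (PySem.List.sorted_pairwise _ _) (PySem.List.sorted_pairwise _ _)]
    constructor
    · intro h
      obtain ⟨x, hx⟩ := List.exists_mem_of_ne_nil _ h
      obtain ⟨hxe, hxf⟩ := (PySem.Set.mem_inter _ _ _).mp hx
      refine ⟨x, ?_, ?_⟩
      · rw [PySem.List.mem_sorted, pvSurnamesB_eq]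
        exact (PySem.Set.mem_ofList _ _).mp hxe
      · rw [PySem.List.mem_sorted, pvSurnamesB_eq]
        exact (PySem.Set.mem_ofList _ _).mp hxf
    · rintro ⟨x, hx1, hx2⟩
      rw [PySem.List.mem_sorted, pvSurnamesB_eq] at hx1 hx2
      exact List.ne_nil_of_mem ((PySem.Set.mem_inter _ _ _).mpr
        ⟨(PySem.Set.mem_ofList _ _).mpr hx1, (PySem.Set.mem_ofList _ _).mpr hx2⟩)
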